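-- pv_equiv track=rewrite | github.com/zhudebin/Datus-agent | datus/utils/benchmark_utils.py | _trim_trailing_non_empty_tables
-- ===== SOURCE A (Python) =====
-- from typing import Any, Dict, Iterable, List, Mapping, MutableMapping, Optional, Protocol, Sequence, Tuple
--
-- def _is_empty_table_identifier(table: Any) -> bool:
--     if table is None:
--         return True
--     text = str(table).strip()
--     return text == ""
--
-- def _trim_trailing_non_empty_tables(tables: Sequence[Any]) -> list[Any]:
--     trimmed: list[Any] = []
--     for table in reversed(tables):
--         if _is_empty_table_identifier(table):
--             break
--         trimmed.append(table)
--     trimmed.reverse()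
--     return trimmed
-- ===== SOURCE B (Python) =====
-- def _is_empty_table_identifier(table):
--     if table is None:
--         return True
--     return str(table).strip() == ""
--
-- def _trim_trailing_non_empty_tables(tables):
--     last_empty = -1
--     for i, table in enumerate(tables):
--         if _is_empty_table_identifier(table):
--             last_empty = i
--     return list(tables[last_empty + 1:])
-- ===== Notes on version B (the rewrite author's own statement) =====
-- stated objective: alternative
-- what changed: Replaces the reverse-iterate-accumulate-then-reverse loop with a single forward pass that tracks the index of the last empty identifier and returns one slice of the original sequence.
import Mathlib
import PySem

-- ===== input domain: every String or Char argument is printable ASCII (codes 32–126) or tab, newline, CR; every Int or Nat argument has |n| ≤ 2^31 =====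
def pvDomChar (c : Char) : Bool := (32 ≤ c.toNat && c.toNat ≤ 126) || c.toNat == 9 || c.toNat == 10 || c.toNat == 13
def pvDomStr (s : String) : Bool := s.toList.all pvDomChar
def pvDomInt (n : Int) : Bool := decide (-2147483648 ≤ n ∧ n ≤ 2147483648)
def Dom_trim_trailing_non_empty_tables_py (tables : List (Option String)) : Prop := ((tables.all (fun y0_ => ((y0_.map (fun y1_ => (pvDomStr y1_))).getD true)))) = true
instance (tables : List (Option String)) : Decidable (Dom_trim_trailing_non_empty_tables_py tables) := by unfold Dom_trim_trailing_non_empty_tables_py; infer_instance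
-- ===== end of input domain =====

-- B replaces A's reverse-iterate-accumulate-then-reverse loop with a single forward pass
-- tracking the last empty-identifier index and one slice (alternative decomposition).


-- ===== PORT A =====
-- _is_empty_table_identifier (shared module helper; str(table) is table itself for a string)
def pvIsEmptyTable (t : Option String) : Bool :=
  match t with
  | none => true
  | some s => PySem.Str.strip s == ""

-- the for-loop over reversed(tables) with break, accumulating into `trimmed`
def pvTrimGo : List (Option String) → List (Option String)
  | [] => []
  | t :: ts => if pvIsEmptyTable t then [] else t :: pvTrimGo ts

def trim_trailing_non_empty_tables_py (tables : List (Option String)) : List (Option String) :=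
  (pvTrimGo tables.reverse).reverse

-- ===== PORT B =====
def trim_trailing_non_empty_tables_py_alt (tables : List (Option String)) : List (Option String) :=
  let lastEmpty : Int :=
    (PySem.List.enumerate tables).foldl
      (fun acc p => if pvIsEmptyTable p.2 then p.1 else acc) (-1)
  PySem.List.slice tables (some (lastEmpty + 1)) none

-- ===== PRECONDITION & SPEC =====
def Spec_trim_trailing_non_empty_tables_py (tables : List (Option String)) (out : List (Option String)) : Prop := out = trim_trailing_non_empty_tables_py_alt tables
instance (tables : List (Option String)) (out : List (Option String)) : Decidable (Spec_trim_trailing_non_empty_tables_py tables out) := by unfold Spec_trim_trailing_non_empty_tables_py; infer_instance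

-- ===== CLAIM (what is proved, stated in full; the proofs are below) =====
def Claim_equal_trim_trailing_non_empty_tables_py : Prop := ∀ (tables : List (Option String)), Dom_trim_trailing_non_empty_tables_py tables → Spec_trim_trailing_non_empty_tables_py tables (trim_trailing_non_empty_tables_py tables)

-- ===== LEMMAS AND PROOFS =====

theorem pvTrimGo_eq_takeWhile (xs : List (Option String)) :
    pvTrimGo xs = xs.takeWhile (fun t => !pvIsEmptyTable t) := by
  induction xs with
  | nil => rfl
  | cons t ts ih =>
    simp only [pvTrimGo, List.takeWhile_cons]
    by_cases h : pvIsEmptyTable t <;> simp [h, ih]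

theorem pvEnumerate_append (xs ys : List (Option String)) (s : Int) :
    PySem.List.enumerate (xs ++ ys) s
      = PySem.List.enumerate xs s ++ PySem.List.enumerate ys (s + xs.length) := by
  induction xs generalizing s with
  | nil => simp [PySem.List.enumerate_nil]
  | cons x xs ih =>
    simp [PySem.List.enumerate_cons, ih]
    ring_nf

-- the boundary index B's forward pass maintains
def pvLastIdx (l : List (Option String)) : Int :=
  (PySem.List.enumerate l).foldl
    (fun acc p => if pvIsEmptyTable p.2 then p.1 else acc) (-1)

theorem pvLastIdx_append (xs : List (Option String)) (t : Option String) :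
    pvLastIdx (xs ++ [t]) = if pvIsEmptyTable t then (xs.length : Int) else pvLastIdx xs := by
  simp [pvLastIdx, pvEnumerate_append, List.foldl_append, PySem.List.enumerate_cons,
    PySem.List.enumerate_nil]

theorem pvLastIdx_lt (l : List (Option String)) : pvLastIdx l < l.length := by
  induction l using List.reverseRecOn with
  | nil => simp [pvLastIdx, PySem.List.enumerate_nil]
  | append_singleton xs t ih =>
    rw [pvLastIdx_append]
    by_cases h : pvIsEmptyTable t <;> simp [h] <;> omega

theorem pvLastIdx_ge (l : List (Option String)) : -1 ≤ pvLastIdx l := by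
  induction l using List.reverseRecOn with
  | nil => simp [pvLastIdx, PySem.List.enumerate_nil]
  | append_singleton xs t ih =>
    rw [pvLastIdx_append]
    by_cases h : pvIsEmptyTable t <;> simp [h] <;> omega

theorem pvMain (l : List (Option String)) :
    (l.reverse.takeWhile (fun t => !pvIsEmptyTable t)).reverse
      = l.drop (pvLastIdx l + 1).toNat := by
  induction l using List.reverseRecOn with
  | nil => simp
  | append_singleton xs t ih =>
    rw [pvLastIdx_append]
    by_cases h : pvIsEmptyTable t
    · simp [h]
    · have hlt := pvLastIdx_lt xs
      have hge := pvLastIdx_ge xs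
      rw [if_neg (by simp [h])]
      simp only [List.reverse_append, List.reverse_singleton,
        List.singleton_append, List.takeWhile_cons, h]
      simp only [Bool.not_false, if_pos, List.reverse_cons, ih]
      rw [List.drop_append_of_le_length (by omega)]

theorem pvFinal (tables : List (Option String)) :
    trim_trailing_non_empty_tables_py tables = trim_trailing_non_empty_tables_py_alt tables := by
  have hge := pvLastIdx_ge tables
  show (pvTrimGo tables.reverse).reverse
      = PySem.List.slice tables (some (pvLastIdx tables + 1)) none
  rw [pvTrimGo_eq_takeWhile, pvMain, PySem.List.slice_from _ (by omega)]

-- ===== VERDICT (by name: the statement is the Claim_ definition above) =====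
theorem trim_trailing_non_empty_tables_py_spec : Claim_equal_trim_trailing_non_empty_tables_py := by
  intro tables _
  exact pvFinal tables
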